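-- pv_equiv track=rewrite | github.com/vpc20/python-misc | RSplit.py | rsplitx
-- ===== SOURCE A (Python) =====
-- def rsplitx(s, sep, maxsplit):
--     a1 = s.split(sep)
--     if maxsplit == 0:
--         return [s]
--     elif maxsplit < 0 or maxsplit > len(a1) - 1:
--         return a1
--     else:
--         return [sep.join(a1[:-maxsplit]) if i == 0 else a1[-maxsplit + i - 1] for i in range(maxsplit + 1)]
-- ===== SOURCE B (Python) =====
-- def rsplitx(s, sep, maxsplit):
--     if not sep:
--         raise ValueError('empty separator')
--     n = s.count(sep)
--     glue = 0 if maxsplit < 0 or maxsplit > n else n - maxsplit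
--     pos = 0
--     for _ in range(glue):
--         pos = s.find(sep, pos) + len(sep)
--     cut = s.find(sep, pos)
--     out = [s if cut < 0 else s[:cut]]
--     while cut >= 0:
--         pos = cut + len(sep)
--         cut = s.find(sep, pos)
--         out.append(s[pos:] if cut < 0 else s[pos:cut])
--     return out
-- ===== Notes on version B (the rewrite author's own statement) =====
-- stated objective: alternative
-- what changed: B replaces A's full split()/join()/negative-index comprehension by a single left-to-right scan with count() and repeated find() that emits the result pieces directly, never materialising the full part list or re-joining it.
-- outside the precondition, e.g. on rsplitx('abc', '', 2): A raises ValueError, B raises ValueError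
import Mathlib
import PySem

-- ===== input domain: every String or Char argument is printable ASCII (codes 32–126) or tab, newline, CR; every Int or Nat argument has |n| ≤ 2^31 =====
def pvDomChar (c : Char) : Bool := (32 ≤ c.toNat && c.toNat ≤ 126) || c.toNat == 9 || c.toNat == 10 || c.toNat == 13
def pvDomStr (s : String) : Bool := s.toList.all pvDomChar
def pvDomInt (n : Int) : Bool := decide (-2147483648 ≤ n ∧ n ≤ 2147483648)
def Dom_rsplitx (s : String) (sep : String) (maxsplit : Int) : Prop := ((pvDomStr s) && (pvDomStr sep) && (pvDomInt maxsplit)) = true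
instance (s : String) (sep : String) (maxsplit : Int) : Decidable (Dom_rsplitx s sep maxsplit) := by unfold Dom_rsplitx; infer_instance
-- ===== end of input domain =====

-- B replaces A's split/join/negative-index comprehension by one left-to-right count/find scan that
-- emits the pieces directly (objective: alternative, same cost class).

-- ===== PORT A =====
def rsplitx (s : String) (sep : String) (maxsplit : Int) : List String :=
  match PySem.Str.split? s sep with
  | none => []  -- s.split('') raises ValueError; such inputs are excluded by Pre_rsplitx
  | some a1 =>
    if maxsplit = 0 then [s]
    else if maxsplit < 0 ∨ maxsplit > (a1.length : Int) - 1 then a1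
    else (PySem.List.pyRange 0 (maxsplit + 1) 1).map (fun i =>
      if i = 0 then PySem.Str.join sep (PySem.List.slice a1 none (some (-maxsplit)))
      else PySem.List.pyGetD a1 (-maxsplit + i - 1) "")

-- ===== PORT B =====
-- the 'while cut >= 0' loop of Source B; the fuel only makes the recursion structural: every
-- iteration consumes one separator occurrence, so len(s)+1 iterations always suffice
def rsplitxWhile (s : String) (sep : String) : Nat → Int → List String → List String
  | 0, _, out => out
  | fuel + 1, cut, out =>
    if cut ≥ 0 then
      let pos := cut + PySem.Str.len sep
      let cut' := PySem.Str.findFrom s sep pos none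
      rsplitxWhile s sep fuel cut'
        (out ++ [if cut' < 0 then PySem.Str.slice s (some pos) none
                 else PySem.Str.slice s (some pos) (some cut')])
    else out

def rsplitx_alt (s : String) (sep : String) (maxsplit : Int) : List String :=
  if sep = "" then []  -- Source B raises ValueError here; such inputs are excluded by Pre_rsplitx
  else
    let n : Int := (PySem.Str.count s sep : Nat)
    let glue : Int := if maxsplit < 0 ∨ maxsplit > n then 0 else n - maxsplit
    let pos : Int := (PySem.List.pyRange 0 glue 1).foldl
      (fun p _ => PySem.Str.findFrom s sep p none + PySem.Str.len sep) 0
    let cut : Int := PySem.Str.findFrom s sep pos none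
    rsplitxWhile s sep (s.toList.length + 1) cut
      (if cut < 0 then [s] else [PySem.Str.slice s none (some cut)])

-- ===== PRECONDITION & SPEC =====
-- Pre_ excludes only sep = "", where Python A raises ValueError('empty separator') (and Source B raises too)
def Pre_rsplitx (s : String) (sep : String) (maxsplit : Int) : Prop := sep ≠ ""
instance (s : String) (sep : String) (maxsplit : Int) : Decidable (Pre_rsplitx s sep maxsplit) := by unfold Pre_rsplitx; infer_instance
def pvWitness_rsplitx : String × String × Int := ("a,b,c", ",", 1)

def Spec_rsplitx (s : String) (sep : String) (maxsplit : Int) (out : List String) : Prop := out = rsplitx_alt s sep maxsplit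
instance (s : String) (sep : String) (maxsplit : Int) (out : List String) : Decidable (Spec_rsplitx s sep maxsplit out) := by unfold Spec_rsplitx; infer_instance

-- ===== CLAIM (what is proved, stated in full; the proofs are below) =====
def Claim_equal_rsplitx : Prop := ∀ (s : String) (sep : String) (maxsplit : Int), Dom_rsplitx s sep maxsplit → Pre_rsplitx s sep maxsplit → Spec_rsplitx s sep maxsplit (rsplitx s sep maxsplit)

-- ===== LEMMAS AND PROOFS =====

-- reference left-greedy splitter / separator counter (proof side only)
def refSplit (sep cur : List Char) : List Char → List (List Char)
  | [] => [cur]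
  | c :: rest =>
    if h : sep.isPrefixOf (c :: rest) = true ∧ sep ≠ [] then
      cur :: refSplit sep [] ((c :: rest).drop sep.length)
    else refSplit sep (cur ++ [c]) rest
termination_by l => l.length
decreasing_by
  · have : 1 ≤ sep.length := List.length_pos_iff.mpr h.2
    simp; omega
  · simp

def refCount (sep : List Char) : List Char → Nat
  | [] => 0
  | c :: rest =>
    if h : sep.isPrefixOf (c :: rest) = true ∧ sep ≠ [] then
      refCount sep ((c :: rest).drop sep.length) + 1
    else refCount sep rest
termination_by l => l.length
decreasing_by
  · have : 1 ≤ sep.length := List.length_pos_iff.mpr h.2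
    simp; omega
  · simp
theorem refSplit_length (sep cur : List Char) (l : List Char) :
    (refSplit sep cur l).length = refCount sep l + 1 := by
  induction cur, l using refSplit.induct sep with
  | case1 cur => simp [refSplit, refCount]
  | case2 cur c rest h ih => rw [refSplit, refCount, dif_pos h, dif_pos h]; simp [ih]
  | case3 cur c rest h ih => rw [refSplit, refCount, dif_neg h, dif_neg h]; exact ih

theorem join_refSplit (sep : List Char) (hs : sep ≠ []) (cur l : List Char) :
    PySem.Chars.join sep (refSplit sep cur l) = cur ++ l := by
  induction cur, l using refSplit.induct sep with
  | case1 cur => simp [refSplit, PySem.Chars.join_singleton]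
  | case2 cur c rest h ih =>
    rw [refSplit, dif_pos h]
    have hne : refSplit sep [] (List.drop sep.length (c :: rest)) ≠ [] := by
      intro hcon
      have := refSplit_length sep [] (List.drop sep.length (c :: rest))
      rw [hcon] at this; simp at this
    obtain ⟨q, t, hq⟩ : ∃ q t, refSplit sep [] (List.drop sep.length (c :: rest)) = q :: t := by
      cases hqt : refSplit sep [] (List.drop sep.length (c :: rest)) with
      | nil => exact absurd hqt hne
      | cons q t => exact ⟨q, t, rfl⟩
    rw [hq, PySem.Chars.join_cons_cons, ← hq, ih]
    have hpre : sep <+: (c :: rest) := List.isPrefixOf_iff_prefix.mp h.1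
    obtain ⟨tl, htl⟩ := hpre
    simp [← htl]
  | case3 cur c rest h ih => rw [refSplit, dif_neg h]; rw [ih]; simp

theorem refCount_le_length (sep : List Char) (l : List Char) :
    refCount sep l ≤ l.length := by
  induction l using refCount.induct sep with
  | case1 => simp [refCount]
  | case2 c rest h ih =>
    rw [refCount, dif_pos h]
    have hlen : sep.length ≤ (c :: rest).length := (List.isPrefixOf_iff_prefix.mp h.1).length_le
    have h1 : 1 ≤ sep.length := List.length_pos_iff.mpr h.2
    simp at ih ⊢; omega
  | case3 c rest h ih => rw [refCount, dif_neg h]; simp; omega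
theorem splitOn_go_eq (sep : List Char) (hs : sep ≠ []) :
    ∀ (fuel : Nat) (l cur : List Char) (acc : List (List Char)), l.length < fuel →
      PySem.Chars.splitOn.go sep fuel l cur acc = acc.reverse ++ refSplit sep cur.reverse l := by
  intro fuel
  induction fuel with
  | zero => intro l cur acc h; omega
  | succ f ih =>
    intro l cur acc h
    cases l with
    | nil => rw [PySem.Chars.splitOn.go.eq_def]; simp [refSplit]
    | cons c rest =>
      rw [PySem.Chars.splitOn.go.eq_def]
      simp only
      by_cases hp : sep.isPrefixOf (c :: rest) = true
      · rw [if_pos hp]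
        have h1 : 1 ≤ sep.length := List.length_pos_iff.mpr hs
        have : (List.drop sep.length (c :: rest)).length < f := by simp; simp at h; omega
        rw [ih _ _ _ this, refSplit, dif_pos ⟨hp, hs⟩]
        simp
      · rw [if_neg hp]
        have : rest.length < f := by simp at h; omega
        rw [ih _ _ _ this, refSplit, dif_neg (by simp [hp])]
        simp

theorem splitOn_eq_refSplit (l sep : List Char) (hs : sep ≠ []) :
    PySem.Chars.splitOn l sep = refSplit sep [] l := by
  rw [PySem.Chars.splitOn, splitOn_go_eq sep hs _ _ _ _ (by omega)]
  simp

theorem count_go_eq (sep : List Char) (hs : sep ≠ []) :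
    ∀ (fuel : Nat) (l : List Char) (acc : Nat), l.length ≤ fuel →
      PySem.Chars.count.go sep fuel l acc = acc + refCount sep l := by
  intro fuel
  induction fuel with
  | zero =>
    intro l acc h
    have : l = [] := List.length_eq_zero_iff.mp (by omega)
    subst this
    rw [PySem.Chars.count.go.eq_def]; simp [refCount]
  | succ f ih =>
    intro l acc h
    cases l with
    | nil => rw [PySem.Chars.count.go.eq_def]; simp [refCount]
    | cons c rest =>
      rw [PySem.Chars.count.go.eq_def]
      simp only
      by_cases hp : sep.isPrefixOf (c :: rest) = true
      · rw [if_pos hp]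
        have h1 : 1 ≤ sep.length := List.length_pos_iff.mpr hs
        have : (List.drop sep.length (c :: rest)).length ≤ f := by simp; simp at h; omega
        rw [ih _ _ this, refCount, dif_pos ⟨hp, hs⟩]
        omega
      · rw [if_neg hp]
        have : rest.length ≤ f := by simp at h; omega
        rw [ih _ _ this, refCount, dif_neg (by simp [hp])]

theorem count_eq_refCount (l sep : List Char) (hs : sep ≠ []) :
    PySem.Chars.count l sep = refCount sep l := by
  rw [PySem.Chars.count, if_neg (by simp [hs]), count_go_eq sep hs _ _ _ (by omega)]
  omega

theorem find_go_shift (sub : List Char) : ∀ (l : List Char) (k : Nat),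
    PySem.Chars.find.go sub l k =
      if PySem.Chars.find l sub = -1 then -1 else ↑k + PySem.Chars.find l sub := by
  intro l
  induction l with
  | nil =>
    intro k
    cases he : sub.isEmpty <;>
      simp [PySem.Chars.find, PySem.Chars.find.go.eq_def, he]
  | cons c rest ih =>
    intro k
    rw [PySem.Chars.find, PySem.Chars.find.go.eq_def sub (c :: rest) k,
      PySem.Chars.find.go.eq_def sub (c :: rest) 0]
    simp only
    by_cases hp : sub.isPrefixOf (c :: rest) = true
    · simp [hp]
    · simp only [hp, Bool.false_eq_true, if_false]
      rw [ih (k + 1), ih 1]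
      have := PySem.Chars.neg_one_le_find rest sub
      by_cases hr : PySem.Chars.find rest sub = -1
      · simp [hr]
      · have h2 : ¬((1 : Int) + PySem.Chars.find rest sub = -1) := by omega
        simp only [hr, if_false]
        rw [if_neg (by push_cast at h2 ⊢; omega)]
        push_cast
        ring
theorem find_nil (sub : List Char) (hs : sub ≠ []) : PySem.Chars.find [] sub = -1 := by
  simp [PySem.Chars.find, PySem.Chars.find.go.eq_def, hs]

theorem find_cons (sub : List Char) (c : Char) (rest : List Char) :
    PySem.Chars.find (c :: rest) sub =
      if sub.isPrefixOf (c :: rest) = true then 0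
      else if PySem.Chars.find rest sub = -1 then -1 else 1 + PySem.Chars.find rest sub := by
  rw [PySem.Chars.find, PySem.Chars.find.go.eq_def sub (c :: rest) 0]
  simp only
  by_cases hp : sub.isPrefixOf (c :: rest) = true
  · simp [hp]
  · simp only [hp, Bool.false_eq_true, if_false]
    rw [find_go_shift]
    by_cases hr : PySem.Chars.find rest sub = -1 <;> simp [hr]

theorem refSplit_find (sep : List Char) (hs : sep ≠ []) (cur l : List Char) :
    refSplit sep cur l =
      if PySem.Chars.find l sep = -1 then [cur ++ l]
      else (cur ++ l.take (PySem.Chars.find l sep).toNat) ::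
        refSplit sep [] (l.drop ((PySem.Chars.find l sep).toNat + sep.length)) := by
  induction cur, l using refSplit.induct sep with
  | case1 cur => rw [find_nil sep hs]; simp [refSplit]
  | case2 cur c rest h ih =>
    rw [refSplit, dif_pos h, find_cons, if_pos h.1]
    simp
  | case3 cur c rest h ih =>
    have hp : ¬sep.isPrefixOf (c :: rest) = true := by
      intro hcon; exact h ⟨hcon, hs⟩
    rw [refSplit, dif_neg h, find_cons, if_neg hp, ih]
    by_cases hr : PySem.Chars.find rest sep = -1
    · simp [hr]
    · have h0 : 0 ≤ PySem.Chars.find rest sep := by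
        have := PySem.Chars.neg_one_le_find rest sep; omega
      have h1 : ¬((1 : Int) + PySem.Chars.find rest sep = -1) := by omega
      simp only [hr, if_false, h1]
      have ht : ((1 : Int) + PySem.Chars.find rest sep).toNat =
          (PySem.Chars.find rest sep).toNat + 1 := by omega
      have hadd : (PySem.Chars.find rest sep).toNat + 1 + sep.length
          = ((PySem.Chars.find rest sep).toNat + sep.length) + 1 := by omega
      rw [ht, hadd, List.drop_succ_cons, List.take_succ_cons]
      simp

theorem refSplit_ne_nil (sep cur l : List Char) : refSplit sep cur l ≠ [] := by
  intro h
  have := refSplit_length sep cur l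
  rw [h] at this; simp at this

theorem join_cons (sep a : List Char) (t : List (List Char)) (ht : t ≠ []) :
    PySem.Chars.join sep (a :: t) = a ++ sep ++ PySem.Chars.join sep t := by
  cases t with
  | nil => exact absurd rfl ht
  | cons q r => rw [PySem.Chars.join_cons_cons]

theorem join_take_succ (sep : List Char) (a1 : List (List Char)) (j : Nat) (hj : j < a1.length) :
    PySem.Chars.join sep (a1.take (j + 1)) =
      PySem.Chars.join sep (a1.take j) ++ (if j = 0 then [] else sep) ++ a1[j] := by
  induction a1 generalizing j with
  | nil => simp at hj
  | cons a t ih =>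
    cases j with
    | zero => simp [PySem.Chars.join_singleton, PySem.Chars.join_nil]
    | succ j' =>
      have hj' : j' < t.length := by simpa using hj
      have htne : t ≠ [] := by intro h; rw [h] at hj'; simp at hj'
      have htake : t.take (j' + 1) ≠ [] := by
        simp [List.take_eq_nil_iff, htne]
      rw [List.take_succ_cons, join_cons sep a _ htake, ih j' hj']
      by_cases hz : j' = 0
      · subst hz
        simp [PySem.Chars.join_singleton, PySem.Chars.join_nil]
      · obtain ⟨j3, rfl⟩ := Nat.exists_eq_succ_of_ne_zero hz
        have htake2 : t.take (j3 + 1) ≠ [] := by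
          simp [List.take_eq_nil_iff, htne]
        rw [List.take_succ_cons, join_cons sep a _ htake2]
        simp [List.append_assoc]

theorem refSplit_single (sep : List Char) (hs : sep ≠ []) (u r : List Char)
    (h : refSplit sep [] u = [r]) : PySem.Chars.find u sep = -1 ∧ r = u := by
  rw [refSplit_find sep hs] at h
  by_cases hf : PySem.Chars.find u sep = -1
  · rw [if_pos hf] at h; simp at h; exact ⟨hf, h.symm⟩
  · rw [if_neg hf] at h
    exfalso
    have := refSplit_ne_nil sep [] (u.drop ((PySem.Chars.find u sep).toNat + sep.length))
    cases hcon : refSplit sep [] (u.drop ((PySem.Chars.find u sep).toNat + sep.length)) with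
    | nil => exact this hcon
    | cons x xs => rw [hcon] at h; simp at h

theorem refSplit_cons2 (sep : List Char) (hs : sep ≠ []) (u r q : List Char)
    (rem : List (List Char)) (h : refSplit sep [] u = r :: q :: rem) :
    0 ≤ PySem.Chars.find u sep ∧
    u.take (PySem.Chars.find u sep).toNat = r ∧
    refSplit sep [] (u.drop ((PySem.Chars.find u sep).toNat + sep.length)) = q :: rem := by
  rw [refSplit_find sep hs] at h
  by_cases hf : PySem.Chars.find u sep = -1
  · rw [if_pos hf] at h; simp at h
  · rw [if_neg hf] at h
    have h0 : 0 ≤ PySem.Chars.find u sep := by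
      have := PySem.Chars.neg_one_le_find u sep; omega
    simp at h
    exact ⟨h0, h.1, h.2⟩

theorem while_neg (s sep : String) (fuel : Nat) (cut : Int) (out : List String)
    (h : cut < 0) : rsplitxWhile s sep fuel cut out = out := by
  cases fuel with
  | zero => rfl
  | succ f => rw [rsplitxWhile, if_neg (by omega)]

theorem while_loop (s sep : String) (hs : sep.toList ≠ []) :
    ∀ (rem : List (List Char)) (fuel : Nat) (c : Nat) (out : List String),
      rem.length ≤ fuel →
      refSplit sep.toList [] (s.toList.drop (c + sep.toList.length)) = rem →
      sep.toList <+: s.toList.drop c →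
      rsplitxWhile s sep fuel (↑c) out = out ++ rem.map String.ofList := by
  intro rem
  induction rem with
  | nil => intro fuel c out _ hsplit _; exact absurd hsplit (refSplit_ne_nil _ _ _)
  | cons r rem' ih =>
    intro fuel c out hfuel hsplit hpre
    have hls : 1 ≤ sep.toList.length := List.length_pos_iff.mpr hs
    have hclen : c + sep.toList.length ≤ s.toList.length := by
      have h1 := hpre.length_le
      have h2 : (s.toList.drop c).length = s.toList.length - c := by simp
      by_cases hc : c ≤ s.toList.length
      · omega
      · exfalso
        have : s.toList.drop c = [] := List.drop_eq_nil_of_le (by omega)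
        rw [this] at hpre
        exact hs (List.prefix_nil.mp hpre)
    cases fuel with
    | zero => simp at hfuel
    | succ f =>
      rw [rsplitxWhile, if_pos (by positivity)]
      simp only []
      have hlen : PySem.Str.len sep = ↑sep.toList.length := PySem.Str.len_eq sep
      have hpos : (↑c : Int) + PySem.Str.len sep = ↑(c + sep.toList.length) := by
        rw [hlen]; push_cast; ring
      rw [hpos]
      have hff := PySem.Str.findFrom_eq s sep ↑(c + sep.toList.length) none
      rw [hff, PySem.Chars.findFrom_natCast s.toList sep.toList _ hclen]
      cases rem' with
      | nil =>
        -- last piece: no further occurrence to the right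
        obtain ⟨hfind, hr⟩ := refSplit_single sep.toList hs _ r hsplit
        have hslice : PySem.Str.slice s (some ↑(c + sep.toList.length)) none =
            String.ofList (s.toList.drop (c + sep.toList.length)) := by
          simp only [PySem.Str.slice, PySem.Chars.slice_eq_listSlice]
          rw [PySem.List.slice_from _ (by omega : (0:Int) ≤ ↑(c + sep.toList.length))]
          congr 1
        rw [if_pos hfind, if_pos (by norm_num : (-1:Int) < 0), hslice, ← hr,
          while_neg s sep f (-1) _ (by omega)]
        simp
      | cons q rem'' =>
        obtain ⟨h0, hr, hrest⟩ := refSplit_cons2 sep.toList hs _ r q rem'' hsplit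
        set i := PySem.Chars.find (s.toList.drop (c + sep.toList.length)) sep.toList with hi
        have hne : ¬ i = -1 := by omega
        rw [if_neg hne]
        have hcast : (↑(c + sep.toList.length) : Int) + i = ↑(c + sep.toList.length + i.toNat) := by
          push_cast; omega
        -- the occurrence found lies at index c + ls + i.toNat
        have hspec := PySem.Chars.find_spec (s := s.toList.drop (c + sep.toList.length))
          (sub := sep.toList) h0
        have hpre' : sep.toList <+: s.toList.drop (c + sep.toList.length + i.toNat) := by
          have := hspec.1
          rwa [List.drop_drop] at this
        have hslice2 : PySem.Str.slice s (some ↑(c + sep.toList.length))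
            (some ↑(c + sep.toList.length + i.toNat)) = String.ofList r := by
          simp only [PySem.Str.slice, PySem.Chars.slice_eq_listSlice]
          rw [PySem.List.slice_toNat _ (by omega) (by omega)]
          rw [← hr]
          congr 2
          omega
        have hrest' : refSplit sep.toList []
            (s.toList.drop ((c + sep.toList.length + i.toNat) + sep.toList.length)) = q :: rem'' := by
          rw [← hrest, List.drop_drop]
          congr 2
          omega
        have hcall := ih f (c + sep.toList.length + i.toNat)
          (out ++ [String.ofList r]) (by simp at hfuel ⊢; omega) hrest' hpre'
        rw [hcast, if_neg (by omega : ¬((↑(c + sep.toList.length + i.toNat) : Int) < 0)),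
          hslice2, hcall]
        simp

theorem skip_loop (s sep : String) (hs : sep.toList ≠ []) (j : Nat)
    (hj : j ≤ refCount sep.toList s.toList) :
    ∃ p : Nat,
      (PySem.List.pyRange 0 (↑j) 1).foldl
          (fun q _ => PySem.Str.findFrom s sep q none + PySem.Str.len sep) 0 = ↑p ∧
      p ≤ s.toList.length ∧
      refSplit sep.toList [] (s.toList.drop p) = (refSplit sep.toList [] s.toList).drop j ∧
      PySem.Chars.join sep.toList ((refSplit sep.toList [] s.toList).take j) ++
        (if j = 0 then [] else sep.toList) = s.toList.take p := by
  induction j with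
  | zero =>
    refine ⟨0, ?_, by omega, by simp, by simp [PySem.Chars.join_nil]⟩
    simp [PySem.List.pyRange]
  | succ j ih =>
    obtain ⟨p, hfold, hp, hsplit, htake⟩ := ih (by omega)
    have hlenA : (refSplit sep.toList [] s.toList).length = refCount sep.toList s.toList + 1 :=
      refSplit_length _ _ _
    have hlong : 2 ≤ ((refSplit sep.toList [] s.toList).drop j).length := by
      simp [hlenA]; omega
    obtain ⟨r, q, rem, hshape⟩ : ∃ r q rem,
        (refSplit sep.toList [] s.toList).drop j = r :: q :: rem := by
      cases h1 : (refSplit sep.toList [] s.toList).drop j with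
      | nil => rw [h1] at hlong; simp at hlong
      | cons a t =>
        cases t with
        | nil => rw [h1] at hlong; simp at hlong
        | cons b u => exact ⟨a, b, u, rfl⟩
    rw [hshape] at hsplit
    obtain ⟨h0, hr, hrest⟩ := refSplit_cons2 sep.toList hs _ r q rem hsplit
    set i := PySem.Chars.find (s.toList.drop p) sep.toList with hi
    have hspec := PySem.Chars.find_spec (s := s.toList.drop p) (sub := sep.toList) h0
    have hipre : sep.toList <+: s.toList.drop (p + i.toNat) := by
      have := hspec.1
      rwa [List.drop_drop] at this
    have hls : 1 ≤ sep.toList.length := List.length_pos_iff.mpr hs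
    have hbound : p + i.toNat + sep.toList.length ≤ s.toList.length := by
      have h1 := hipre.length_le
      rw [List.length_drop] at h1
      by_cases hc : p + i.toNat ≤ s.toList.length
      · omega
      · exfalso
        have : s.toList.drop (p + i.toNat) = [] := List.drop_eq_nil_of_le (by omega)
        rw [this] at hipre
        exact hs (List.prefix_nil.mp hipre)
    refine ⟨p + i.toNat + sep.toList.length, ?_, hbound, ?_, ?_⟩
    · have hcast : (↑(j + 1) : Int) = (↑j : Int) + 1 := by push_cast; ring
      rw [hcast, PySem.List.pyRange_one_succ_right (by omega : (0:Int) ≤ ↑j),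
        List.foldl_append, hfold]
      simp only [List.foldl_cons, List.foldl_nil]
      rw [PySem.Str.findFrom_eq, PySem.Chars.findFrom_natCast s.toList sep.toList p hp,
        ← hi, if_neg (by omega), PySem.Str.len_eq]
      push_cast
      omega
    · have hdj : List.drop (j + 1) (refSplit sep.toList [] s.toList) = q :: rem := by
        rw [← List.drop_drop, hshape]
        simp
      rw [hdj, ← hrest, List.drop_drop,
        show p + (i.toNat + sep.toList.length) = p + i.toNat + sep.toList.length from by omega]
    · have hjlt : j < (refSplit sep.toList [] s.toList).length := by omega
      have hgetj : (refSplit sep.toList [] s.toList)[j]'hjlt = r := by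
        have h9 : (List.drop j (refSplit sep.toList [] s.toList))[0]'(by rw [hshape]; simp) = r := by
          simp [hshape]
        rw [List.getElem_drop] at h9
        simpa using h9
      rw [join_take_succ sep.toList _ j hjlt, hgetj]
      have htk : List.take (p + i.toNat + sep.toList.length) s.toList =
          List.take p s.toList ++ List.take (i.toNat + sep.toList.length) (List.drop p s.toList) := by
        rw [← List.take_add]
        congr 1
        omega
      have hseg : List.take (i.toNat + sep.toList.length) (List.drop p s.toList) =
          r ++ sep.toList := by
        rw [List.take_add, hr]
        congr 1
        obtain ⟨tl, htl⟩ := hipre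
        rw [List.drop_drop, ← htl]
        exact List.take_left ..
      rw [htk, hseg, ← htake]
      simp [List.append_assoc]

theorem map_getD_tail {α : Type} (xs : List α) (d : α) (mm : Nat)
    (hm1 : 1 ≤ mm) (hmL : mm < xs.length) :
    ∀ (dfuel j : Nat), j + dfuel = mm + 1 → 1 ≤ j →
      (PySem.List.pyRange (↑j) (↑mm + 1) 1).map
          (fun i => PySem.List.pyGetD xs (-↑mm + i - 1) d) =
        xs.drop (xs.length - mm - 1 + j) := by
  intro dfuel
  induction dfuel with
  | zero =>
    intro j hj hj1
    have hj' : j = mm + 1 := by omega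
    subst hj'
    have h1 : ((↑(mm + 1) : Int)) = ↑mm + 1 := by push_cast; ring
    rw [h1]
    have h2 : PySem.List.pyRange (↑mm + 1) (↑mm + 1) 1 = [] := by
      simp [PySem.List.pyRange]
    rw [h2]
    have h3 : xs.length ≤ xs.length - mm - 1 + (mm + 1) := by omega
    simp [List.drop_eq_nil_of_le h3]
  | succ f ih =>
    intro j hj hj1
    have hjm : j ≤ mm := by omega
    rw [PySem.List.pyRange_one_cons (by push_cast; omega : (↑j : Int) < ↑mm + 1)]
    rw [List.map_cons]
    have hcast : (↑j : Int) + 1 = ↑(j + 1) := by push_cast; ring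
    rw [hcast, ih (j + 1) (by omega) (by omega)]
    have hidx : xs.length - mm - 1 + j < xs.length := by omega
    have hval : PySem.List.pyGetD xs (-↑mm + ↑j - 1) d = xs[xs.length - mm - 1 + j]'hidx := by
      have hneg : ¬ (0 ≤ (-↑mm + ↑j - 1 : Int)) := by omega
      have hge : -(↑xs.length : Int) ≤ -↑mm + ↑j - 1 := by omega
      simp only [PySem.List.pyGetD, PySem.List.pyGet?, PySem.List.pyIdx?]
      rw [if_neg hneg, if_pos hge]
      have hnat : xs.length - (-(-↑mm + ↑j - 1 : Int)).toNat = xs.length - mm - 1 + j := by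
        omega
      rw [hnat]
      simp [List.getElem?_eq_getElem hidx]
    rw [hval, show xs.length - mm - 1 + (j + 1) = (xs.length - mm - 1 + j) + 1 from by omega,
      ← List.drop_eq_getElem_cons hidx]

theorem str_join_ofList (sep : String) (xs : List (List Char)) :
    PySem.Str.join sep (xs.map String.ofList) = String.ofList (PySem.Chars.join sep.toList xs) := by
  have h := PySem.Str.toList_join sep (xs.map String.ofList)
  have h2 : (xs.map String.ofList).map String.toList = xs := by
    simp [List.map_map, Function.comp_def]
  rw [h2] at h
  calc PySem.Str.join sep (xs.map String.ofList)
      = String.ofList ((PySem.Str.join sep (xs.map String.ofList)).toList) :=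
        String.ofList_toList.symm
    _ = _ := by rw [h]

theorem toList_ne_nil (t : String) (h : t ≠ "") : t.toList ≠ [] := by
  intro hcon
  exact h (by rw [← String.ofList_toList (s := t), hcon])

theorem a_eq (s sep : String) (hsep : sep ≠ "") (m : Int) (g : Nat)
    (hg : (↑g : Int) = if m < 0 ∨ m > (↑(refCount sep.toList s.toList) : Int) then 0
      else ↑(refCount sep.toList s.toList) - m) :
    rsplitx s sep m =
      String.ofList (PySem.Chars.join sep.toList
          ((refSplit sep.toList [] s.toList).take (g + 1))) ::
        ((refSplit sep.toList [] s.toList).drop (g + 1)).map String.ofList := by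
  have hs : sep.toList ≠ [] := toList_ne_nil sep hsep
  have hsplit? : PySem.Str.split? s sep =
      some ((refSplit sep.toList [] s.toList).map String.ofList) := by
    rw [PySem.Str.split?, PySem.Chars.split?, if_neg (by simp [hs]),
      splitOn_eq_refSplit _ _ hs]
    simp
  have hlenA : (refSplit sep.toList [] s.toList).length = refCount sep.toList s.toList + 1 :=
    refSplit_length _ _ _
  set A := refSplit sep.toList [] s.toList with hA
  set n := refCount sep.toList s.toList with hn
  rw [rsplitx, hsplit?]
  simp only
  by_cases hm0 : m = 0
  · subst hm0
    rw [if_pos rfl]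
    have hgn : g = n := by
      have hcond : ¬((0:Int) < 0 ∨ (0:Int) > (↑n : Int)) := by omega
      rw [if_neg hcond] at hg
      omega
    subst hgn
    rw [List.take_of_length_le (by omega), List.drop_eq_nil_of_le (by omega),
      join_refSplit _ hs]
    simp [String.ofList_toList]
  · rw [if_neg hm0]
    by_cases hbig : m < 0 ∨ m > (↑(A.map String.ofList).length : Int) - 1
    · rw [if_pos hbig]
      have hg0 : g = 0 := by
        rw [if_pos (by simp [hlenA] at hbig; push_cast; omega)] at hg
        omega
      subst hg0
      obtain ⟨a, t, hat⟩ : ∃ a t, A = a :: t := by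
        cases hA' : A with
        | nil => exact absurd hA' (refSplit_ne_nil _ _ _)
        | cons a t => exact ⟨a, t, rfl⟩
      rw [hat]
      simp [PySem.Chars.join_singleton]
    · rw [if_neg hbig]
      push_neg at hbig
      have hmpos : 1 ≤ m := by omega
      have hmn : m ≤ (↑n : Int) := by
        simp [hlenA] at hbig
        push_cast at hbig ⊢
        omega
      set mm := m.toNat with hmm
      have hmcast : m = ↑mm := by omega
      have hg' : g = n - mm := by
        rw [if_neg (by omega)] at hg
        omega
      have hmm1 : 1 ≤ mm := by omega
      have hmmn : mm ≤ n := by omega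
      rw [hmcast]
      rw [PySem.List.pyRange_one_cons (by push_cast; omega : (0:Int) < ↑mm + 1)]
      rw [List.map_cons, if_pos rfl]
      -- head element
      have hhead : PySem.List.slice (A.map String.ofList) none (some (-↑mm)) =
          (A.take (g + 1)).map String.ofList := by
        rw [PySem.List.slice_to_neg_natCast _ mm (by omega), List.map_take]
        congr 1
        simp [hlenA]
        omega
      rw [hhead, str_join_ofList]
      congr 1
      have hstep : ∀ x ∈ PySem.List.pyRange 1 (↑mm + 1) 1, ¬ x = 0 := by
        intro x hx
        rw [PySem.List.mem_pyRange_one] at hx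
        omega
      rw [List.map_congr_left
          (g := fun i => PySem.List.pyGetD (A.map String.ofList) (-↑mm + i - 1) "")
          (fun x hx => by rw [if_neg (hstep x hx)])]
      have htail := map_getD_tail (A.map String.ofList) "" mm hmm1
        (by simp [hlenA]; omega) mm 1 (by omega) (by omega)
      simp only [Nat.cast_one] at htail
      rw [show ((0:Int) + 1) = 1 from by norm_num, htail, List.map_drop]
      congr 1
      simp [hlenA]
      omega

theorem alt_eq (s sep : String) (hsep : sep ≠ "") (m : Int) (g : Nat)
    (hg : (↑g : Int) = if m < 0 ∨ m > (↑(refCount sep.toList s.toList) : Int) then 0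
      else ↑(refCount sep.toList s.toList) - m) :
    rsplitx_alt s sep m =
      String.ofList (PySem.Chars.join sep.toList
          ((refSplit sep.toList [] s.toList).take (g + 1))) ::
        ((refSplit sep.toList [] s.toList).drop (g + 1)).map String.ofList := by
  have hs : sep.toList ≠ [] := toList_ne_nil sep hsep
  have hlenA := refSplit_length sep.toList [] s.toList
  set A := refSplit sep.toList [] s.toList with hA
  set n := refCount sep.toList s.toList with hn
  have hgle : g ≤ n := by
    by_cases h : m < 0 ∨ m > (↑n : Int)
    · rw [if_pos h] at hg; omega
    · rw [if_neg h] at hg; push_neg at h; omega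
  rw [rsplitx_alt, if_neg hsep]
  simp only []
  have hglue : (if m < 0 ∨ m > (↑(PySem.Str.count s sep) : Int) then (0:Int)
      else (↑(PySem.Str.count s sep) : Int) - m) = ↑g := by
    rw [PySem.Str.count, count_eq_refCount _ _ hs, ← hn, ← hg]
  rw [hglue]
  obtain ⟨p, hfold, hp, hsplitp, htakep⟩ := skip_loop s sep hs g (by omega)
  rw [hfold, PySem.Str.findFrom_eq, PySem.Chars.findFrom_natCast s.toList sep.toList p hp]
  have hnle := refCount_le_length sep.toList s.toList
  by_cases hgn : g = n
  · -- no splits remain: the whole rest is one piece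
    obtain ⟨r, hr1⟩ : ∃ r, A.drop g = [r] := by
      have h1 : (A.drop g).length = 1 := by simp [hlenA]; omega
      cases h2 : A.drop g with
      | nil => rw [h2] at h1; simp at h1
      | cons a t =>
        cases t with
        | nil => exact ⟨a, rfl⟩
        | cons b u => rw [h2] at h1; simp at h1
    rw [hr1] at hsplitp
    obtain ⟨hfind, hr⟩ := refSplit_single sep.toList hs _ r hsplitp
    rw [if_pos hfind, if_pos (by norm_num : (-1:Int) < 0),
      while_neg s sep _ (-1) _ (by omega)]
    rw [List.take_of_length_le (by omega), List.drop_eq_nil_of_le (by omega),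
      join_refSplit _ hs]
    simp [String.ofList_toList]
  · -- at least one split remains
    have hlong : 2 ≤ (A.drop g).length := by simp [hlenA]; omega
    obtain ⟨r, q, rem, hshape⟩ : ∃ r q rem, A.drop g = r :: q :: rem := by
      cases h1 : A.drop g with
      | nil => rw [h1] at hlong; simp at hlong
      | cons a t =>
        cases t with
        | nil => rw [h1] at hlong; simp at hlong
        | cons b u => exact ⟨a, b, u, rfl⟩
    rw [hshape] at hsplitp
    obtain ⟨h0, hr, hrest⟩ := refSplit_cons2 sep.toList hs _ r q rem hsplitp
    set i := PySem.Chars.find (s.toList.drop p) sep.toList with hi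
    rw [if_neg (by omega)]
    have hspec := PySem.Chars.find_spec (s := s.toList.drop p) (sub := sep.toList) h0
    have hipre : sep.toList <+: s.toList.drop (p + i.toNat) := by
      have := hspec.1
      rwa [List.drop_drop] at this
    have hls : 1 ≤ sep.toList.length := List.length_pos_iff.mpr hs
    have hcast : (↑p : Int) + i = ↑(p + i.toNat) := by push_cast; omega
    rw [hcast, if_neg (by omega : ¬((↑(p + i.toNat) : Int) < 0))]
    have hdj : List.drop (g + 1) A = q :: rem := by
      rw [← List.drop_drop, hshape]
      simp
    have hrest' : refSplit sep.toList []
        (s.toList.drop ((p + i.toNat) + sep.toList.length)) = q :: rem := by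
      rw [← hrest, List.drop_drop]
      congr 2
      omega
    have hcall := while_loop s sep hs (q :: rem) (s.toList.length + 1) (p + i.toNat)
      [PySem.Str.slice s none (some ↑(p + i.toNat))]
      (by
        have h1 := congrArg List.length hshape
        simp [hlenA] at h1
        simp only [List.length_cons]
        omega) hrest' hipre
    rw [hcall, hdj]
    -- head piece
    have hjlt : g < A.length := by omega
    have hgetg : A[g]'hjlt = r := by
      have h9 : (List.drop g A)[0]'(by rw [hshape]; simp) = r := by simp [hshape]
      rw [List.getElem_drop] at h9
      simpa using h9
    have hhead : PySem.Str.slice s none (some ↑(p + i.toNat)) =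
        String.ofList (PySem.Chars.join sep.toList (A.take (g + 1))) := by
      simp only [PySem.Str.slice, PySem.Chars.slice_eq_listSlice]
      rw [PySem.List.slice_to _ (by omega : (0:Int) ≤ ↑(p + i.toNat))]
      congr 1
      rw [show (↑(p + i.toNat) : Int).toNat = p + i.toNat from by omega,
        List.take_add, ← htakep, hr, join_take_succ sep.toList A g hjlt, hgetg]
    rw [hhead]
    rfl

-- ===== VERDICT (by name: the statement is the Claim_ definition above) =====
theorem rsplitx_spec : Claim_equal_rsplitx := by
  intro s sep m _ hpre
  have hsep : sep ≠ "" := hpre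
  unfold Spec_rsplitx
  set gI : Int := if m < 0 ∨ m > (↑(refCount sep.toList s.toList) : Int) then 0
    else ↑(refCount sep.toList s.toList) - m with hgI
  have h0 : 0 ≤ gI := by
    rw [hgI]
    split_ifs with h
    · omega
    · push_neg at h
      omega
  have hg : (↑gI.toNat : Int) = gI := Int.toNat_of_nonneg h0
  rw [a_eq s sep hsep m gI.toNat (by rw [hg]),
    alt_eq s sep hsep m gI.toNat (by rw [hg])]
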